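-- pv_equiv track=rewrite | github.com/young2141/PS_Codes | solved/swea4530.py | calc
-- ===== SOURCE A (Python) =====
-- def calc(num):
-- 	ret = 0
-- 	l = len(str(num))
-- 	n = str(num)
-- 	s = 0
-- 	for i in range(l-1, -1, -1):
-- 		val = int(n[i])
-- 		if val > 4 :
-- 			val -= 1
-- 		ret += val * pow(9,s)
-- 		s += 1
-- 	return  ret - 1
-- ===== SOURCE B (Python) =====
-- def calc(num):
--     ret = 0
--     for c in str(num):
--         val = int(c)
--         if val > 4:
--             val -= 1
--         ret = ret * 9 + val
--     return ret - 1
-- ===== Notes on version B (the rewrite author's own statement) =====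
-- stated objective: idiomatic
-- what changed: Replaced the reversed index loop with explicit per-digit power weighting and a separate exponent counter by a single left-to-right Horner accumulation over the digit string.
import Mathlib
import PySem

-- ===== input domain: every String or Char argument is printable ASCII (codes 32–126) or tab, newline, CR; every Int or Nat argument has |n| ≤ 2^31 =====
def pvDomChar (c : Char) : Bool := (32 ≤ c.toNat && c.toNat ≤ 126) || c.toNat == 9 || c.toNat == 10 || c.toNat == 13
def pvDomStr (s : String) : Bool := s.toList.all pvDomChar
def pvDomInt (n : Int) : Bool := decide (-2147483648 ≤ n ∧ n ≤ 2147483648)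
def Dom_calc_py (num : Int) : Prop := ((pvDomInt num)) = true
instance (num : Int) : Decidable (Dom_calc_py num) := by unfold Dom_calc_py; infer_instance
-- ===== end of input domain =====

-- B replaces A's reversed index loop with pow(9,s) weighting by a left-to-right Horner accumulation; idiomatic, same cost class.


-- digit value of one character, as both Pythons compute it: int(c), with 0 only where
-- Python would raise (such inputs are excluded by Pre_calc_py)
def pvVal (c : Char) : Int :=
  let v := (PySem.Int.ofChars? [c]).getD 0
  if v > 4 then v - 1 else v

-- ===== PORT A =====
def calc_py (num : Int) : Int :=
  let n := PySem.Int.toChars num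
  let l : Int := n.length
  let st :=
    (PySem.List.pyRange (l - 1) (-1) (-1)).foldl
      (fun (st : Int × Nat) i =>
        (st.1 + pvVal (PySem.List.pyGetD n i ' ') * 9 ^ st.2, st.2 + 1))
      (0, 0)
  st.1 - 1

-- ===== PORT B =====
def calc_py_alt (num : Int) : Int :=
  ((PySem.Int.toChars num).foldl (fun ret c => ret * 9 + pvVal c) 0) - 1

-- ===== PRECONDITION & SPEC =====
-- A raises ValueError on negative num (int('-')); excluded here.
def Pre_calc_py (num : Int) : Prop := 0 ≤ num
instance (num : Int) : Decidable (Pre_calc_py num) := by unfold Pre_calc_py; infer_instance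
def pvWitness_calc_py : Int := (4530)
def Spec_calc_py (num : Int) (out : Int) : Prop := out = calc_py_alt num
instance (num : Int) (out : Int) : Decidable (Spec_calc_py num out) := by unfold Spec_calc_py; infer_instance

-- ===== CLAIM (what is proved, stated in full; the proofs are below) =====
def Claim_equal_calc_py : Prop := ∀ (num : Int), Dom_calc_py num → Pre_calc_py num → Spec_calc_py num (calc_py num)

-- ===== LEMMAS AND PROOFS =====

-- A's downward index walk reads exactly the reversed character list
lemma pv_map_rev (n : List Char) :
    (PySem.List.pyRange ((n.length : Int) - 1) (-1) (-1)).map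
      (fun i => PySem.List.pyGetD n i ' ') = n.reverse := by
  rw [PySem.List.pyRange_neg_one_eq_reverse]
  simp only [neg_add_cancel, sub_add_cancel, List.map_reverse]
  rw [PySem.List.map_pyGetD_pyRange_zero' n ' ']

-- accumulating v(c)·9^s over a list equals 9^s times the Horner value of its reverse
lemma pv_fold_horner (rev : List Char) (r : Int) (s : Nat) :
    ((rev.foldl (fun (st : Int × Nat) c => (st.1 + pvVal c * 9 ^ st.2, st.2 + 1)) (r, s)).1)
      = r + 9 ^ s * rev.foldr (fun c a => a * 9 + pvVal c) 0 := by
  induction rev generalizing r s with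
  | nil => simp
  | cons c rev ih =>
      simp only [List.foldl_cons, List.foldr_cons, ih]
      ring

-- ===== VERDICT (by name: the statement is the Claim_ definition above) =====
theorem calc_py_spec : Claim_equal_calc_py := by
  intro num _ _
  show calc_py num = calc_py_alt num
  unfold calc_py calc_py_alt
  have h1 : (PySem.List.pyRange (((PySem.Int.toChars num).length : Int) - 1) (-1) (-1)).foldl
      (fun (st : Int × Nat) i =>
        (st.1 + pvVal (PySem.List.pyGetD (PySem.Int.toChars num) i ' ') * 9 ^ st.2, st.2 + 1)) (0, 0)
      = ((PySem.Int.toChars num).reverse).foldl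
          (fun (st : Int × Nat) c => (st.1 + pvVal c * 9 ^ st.2, st.2 + 1)) (0, 0) := by
    rw [← pv_map_rev, List.foldl_map]
  simp only [h1, pv_fold_horner, List.foldr_reverse]
  ring
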